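-- pv_equiv track=rewrite | github.com/JoaoDoJava21/dualstack-radar | backend/app.py | _dividir_trabalho
-- ===== SOURCE A (Python) =====
-- def _dividir_trabalho(n, cat_config):
--     """
--     Divide 99Freelas / Reddit / GitHub da categoria em n fatias (round-robin).
--     Workana NÃO entra aqui — Playwright não é thread-safe e roda
--     separadamente em fase única antes dos workers paralelos.
--     """
--     freelas = [cat_config["freelas"][i::n] for i in range(n)]
--     reddit  = [cat_config["reddit"][i::n]  for i in range(n)]
--     github  = [cat_config["github"][i::n]  for i in range(n)]
--
--     return [
--         {"freelas": freelas[i], "reddit": reddit[i], "github": github[i]}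
--         for i in range(n)
--     ]
-- ===== SOURCE B (Python) =====
-- def _dividir_trabalho(n, cat_config):
--     """Round-robin split of the three source lists into n slices, by one
--     forward distribution pass (element j goes to slice j % n)."""
--     result = [{"freelas": [], "reddit": [], "github": []} for _ in range(n)]
--     if n > 0:
--         for key in ("freelas", "reddit", "github"):
--             for j, x in enumerate(cat_config[key]):
--                 result[j % n][key].append(x)
--     return result
-- ===== Notes on version B (the rewrite author's own statement) =====
-- stated objective: alternative
-- what changed: B replaces A's three families of strided-slice comprehensions (cat_config[key][i::n] for each slice i) by a single forward distribution pass: it preallocates the n result dicts and appends each element at position j to slice j % n.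
import Mathlib
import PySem

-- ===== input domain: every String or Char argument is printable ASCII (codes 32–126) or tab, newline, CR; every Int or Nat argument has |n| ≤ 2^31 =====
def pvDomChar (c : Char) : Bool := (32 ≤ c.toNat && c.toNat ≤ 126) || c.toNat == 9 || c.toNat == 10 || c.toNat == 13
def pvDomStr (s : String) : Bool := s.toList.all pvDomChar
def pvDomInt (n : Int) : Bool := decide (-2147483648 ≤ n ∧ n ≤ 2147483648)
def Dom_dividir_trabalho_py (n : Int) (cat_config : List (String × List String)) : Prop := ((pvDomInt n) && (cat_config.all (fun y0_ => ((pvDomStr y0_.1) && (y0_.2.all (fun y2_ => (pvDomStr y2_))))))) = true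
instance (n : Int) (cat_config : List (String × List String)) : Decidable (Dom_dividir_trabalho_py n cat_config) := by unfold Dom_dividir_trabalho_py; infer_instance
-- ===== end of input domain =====

-- B replaces A's three families of strided slices cat_config[key][i::n] by a single
-- forward distribution pass (element j goes to slice j % n); same results, proved equal.

-- ===== PORT A =====
-- cat_config[key] is dict lookup = first match in the association list; Pre_ guarantees
-- the key is present whenever n > 0, so the [] default of getD is never the value used.
def dividir_trabalho_py (n : Int) (cat_config : List (String × List String)) : List (List (String × List String)) :=
  let freelas := (PySem.List.pyRange 0 n 1).map (fun i =>
    (PySem.List.slice? ((cat_config.lookup "freelas").getD []) (some i) none n).getD [])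
  let reddit := (PySem.List.pyRange 0 n 1).map (fun i =>
    (PySem.List.slice? ((cat_config.lookup "reddit").getD []) (some i) none n).getD [])
  let github := (PySem.List.pyRange 0 n 1).map (fun i =>
    (PySem.List.slice? ((cat_config.lookup "github").getD []) (some i) none n).getD [])
  (PySem.List.pyRange 0 n 1).map (fun i =>
    [("freelas", PySem.List.pyGetD freelas i []),
     ("reddit",  PySem.List.pyGetD reddit i []),
     ("github",  PySem.List.pyGetD github i [])])

-- ===== PORT B =====
-- result[j % n][key].append(x): the value list stored under key in one inner dict gets x appended
def pvAppendKey (d : List (String × List String)) (key : String) (x : String) : List (String × List String) :=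
  d.map (fun p => if p.1 == key then (p.1, p.2 ++ [x]) else p)

-- for j, x in enumerate(cat_config[key]): result[j % n][key].append(x)
def pvDistribute (n : Int) (key : String) (xs : List String)
    (result : List (List (String × List String))) : List (List (String × List String)) :=
  (PySem.List.enumerate xs 0).foldl
    (fun res jx => res.modify (PySem.Int.mod jx.1 n).toNat (fun d => pvAppendKey d key jx.2)) result

def dividir_trabalho_py_alt (n : Int) (cat_config : List (String × List String)) : List (List (String × List String)) :=
  let result := (PySem.List.pyRange 0 n 1).map (fun _ =>
    [("freelas", ([] : List String)), ("reddit", ([] : List String)), ("github", ([] : List String))])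
  if 0 < n then
    ["freelas", "reddit", "github"].foldl
      (fun res key => pvDistribute n key ((cat_config.lookup key).getD []) res) result
  else result

-- ===== PRECONDITION & SPEC =====
-- Pre_ excludes exactly the inputs where the Python A raises KeyError: n > 0 with one of
-- the three keys missing from cat_config (for n <= 0 A touches no key and returns []).
def Pre_dividir_trabalho_py (n : Int) (cat_config : List (String × List String)) : Prop :=
  0 < n → ((cat_config.lookup "freelas").isSome ∧ (cat_config.lookup "reddit").isSome ∧
           (cat_config.lookup "github").isSome)
instance (n : Int) (cat_config : List (String × List String)) : Decidable (Pre_dividir_trabalho_py n cat_config) := by unfold Pre_dividir_trabalho_py; infer_instance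

def pvWitness_dividir_trabalho_py : Int × (List (String × List String)) :=
  (2, [("freelas", ["a", "b", "c"]), ("reddit", ["d"]), ("github", [])])

def Spec_dividir_trabalho_py (n : Int) (cat_config : List (String × List String)) (out : List (List (String × List String))) : Prop := out = dividir_trabalho_py_alt n cat_config
instance (n : Int) (cat_config : List (String × List String)) (out : List (List (String × List String))) : Decidable (Spec_dividir_trabalho_py n cat_config out) := by unfold Spec_dividir_trabalho_py; infer_instance

-- ===== CLAIM (what is proved, stated in full; the proofs are below) =====
def Claim_equal_dividir_trabalho_py : Prop := ∀ (n : Int) (cat_config : List (String × List String)), Dom_dividir_trabalho_py n cat_config → Pre_dividir_trabalho_py n cat_config → Spec_dividir_trabalho_py n cat_config (dividir_trabalho_py n cat_config)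

-- ===== LEMMAS AND PROOFS =====

-- the elements of xs at positions p with p ≡ d (mod n): bucket contents in both programs
def pvStrided (n : Int) : Nat → List String → List String
  | _, [] => []
  | 0, x :: xs => x :: pvStrided n (n.toNat - 1) xs
  | d + 1, _ :: xs => pvStrided n d xs

def pvAppendMany (d : List (String × List String)) (key : String) (ys : List String) : List (String × List String) :=
  d.map (fun p => if p.1 == key then (p.1, p.2 ++ ys) else p)

theorem pvAppendMany_nil (d : List (String × List String)) (key : String) :
    pvAppendMany d key [] = d := by
  simp [pvAppendMany]

theorem pvAppendMany_appendKey (d : List (String × List String)) (key : String) (x : String)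
    (ys : List String) :
    pvAppendMany (pvAppendKey d key x) key ys = pvAppendMany d key (x :: ys) := by
  simp only [pvAppendMany, pvAppendKey, List.map_map]
  refine List.map_congr_left ?_
  intro p _
  by_cases h : p.1 = key <;> simp [h]

-- A-side slice characterisation: xs[i::n] = pvStrided n i xs  (0 ≤ i, 0 < n)
theorem pv_slice?_nil (n i : Int) (hn : 0 < n) :
    PySem.List.slice? ([] : List String) (some i) none n = some [] := by
  simp [PySem.List.slice?, PySem.List.sliceIndices, hn.ne', hn.not_gt]

theorem pv_slice?_cons_succ (n i : Int) (x : String) (xs : List String) (hi : 1 ≤ i) (hn : 0 < n) :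
    PySem.List.slice? (x :: xs) (some i) none n = PySem.List.slice? xs (some (i - 1)) none n := by
  simp only [PySem.List.slice?, PySem.List.sliceIndices, if_neg hn.ne', if_pos hn,
    if_neg (by omega : ¬ i < 0), if_neg (by omega : ¬ i - 1 < 0), if_neg (by omega : ¬ n < 0),
    List.length_cons]
  push_cast
  set L := (xs.length : Int) with hL
  have hL0 : 0 ≤ L := Int.natCast_nonneg _
  have hmin : min i (L + 1) = min (i - 1) L + 1 := by omega
  rw [hmin]
  set m := min (i - 1) L with hm
  have hm0 : 0 ≤ m := by omega
  have hcount : (if m + 1 < L + 1 then ((L + 1 - (m + 1) + n - 1) / n).toNat else 0)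
      = (if m < L then ((L - m + n - 1) / n).toNat else 0) := by
    split_ifs with h1 h2 h2 <;> try omega
    congr 2
    omega
  rw [hcount]
  have hfun : (fun k : ℕ => (x :: xs)[(m + 1 + n * (k : Int)).toNat]?)
      = (fun k : ℕ => xs[(m + n * (k : Int)).toNat]?) := by
    funext k
    have hk : (m + 1 + n * (k : Int)).toNat = (m + n * (k : Int)).toNat + 1 := by
      have : 0 ≤ n * (k : Int) := by positivity
      omega
    rw [hk, List.getElem?_cons_succ]
  rw [hfun]

theorem pv_slice?_cons_zero (n : Int) (x : String) (xs : List String) (hn : 0 < n) :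
    PySem.List.slice? (x :: xs) (some 0) none n =
      some (x :: (PySem.List.slice? xs (some (n - 1)) none n).getD []) := by
  simp only [PySem.List.slice?, PySem.List.sliceIndices, if_neg hn.ne', if_pos hn,
    if_neg (by omega : ¬ (0 : Int) < 0), if_neg (by omega : ¬ n - 1 < 0),
    if_neg (by omega : ¬ n < 0), List.length_cons, Option.getD_some]
  push_cast
  set L := (xs.length : Int) with hL
  have hL0 : 0 ≤ L := Int.natCast_nonneg _
  rw [show min (0 : Int) (L + 1) = 0 by omega, if_pos (by omega : (0:Int) < L + 1)]
  have hdiv : (L + 1 - 0 + n - 1) / n = L / n + 1 := by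
    rw [show L + 1 - 0 + n - 1 = L + 1 * n by ring, Int.add_mul_ediv_right _ _ hn.ne']
  rw [hdiv]
  have hq0 : 0 ≤ L / n := Int.ediv_nonneg hL0 hn.le
  rw [show (L / n + 1).toNat = (L / n).toNat + 1 by omega, List.range_succ_eq_map]
  rw [List.filterMap_cons]
  simp only [Nat.cast_zero, mul_zero, add_zero, Int.toNat_zero, List.getElem?_cons_zero,
    List.filterMap_map]
  by_cases hcase : n - 1 < L
  · rw [min_eq_left (by omega), if_pos hcase]
    have hcr : (L - (n - 1) + n - 1) / n = L / n := by congr 1; ring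
    rw [hcr]
    refine congrArg some (congrArg (List.cons x) ?_)
    have hfun : ((fun k : ℕ => (x :: xs)[(0 + n * (k : Int)).toNat]?) ∘ (fun k => k + 1))
        = (fun k : ℕ => xs[(n - 1 + n * (k : Int)).toNat]?) := by
      funext k
      have hk : (0 + n * ((k : Int) + 1)).toNat = (n - 1 + n * (k : Int)).toNat + 1 := by
        have h1 : 0 ≤ n * (k : Int) := by positivity
        have h2 : n * ((k : Int) + 1) = n * (k : Int) + n := by ring
        omega
      simp only [Function.comp_apply]
      push_cast
      rw [hk, List.getElem?_cons_succ]
    rw [hfun]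
  · rw [min_eq_right (by omega), if_neg (by omega : ¬ L < L)]
    have : L / n = 0 := Int.ediv_eq_zero_of_lt hL0 (by omega)
    rw [this]
    simp

theorem pv_slice?_eq_pvStrided (n : Int) (hn : 0 < n) :
    ∀ (xs : List String) (i : Int), 0 ≤ i →
      (PySem.List.slice? xs (some i) none n).getD [] = pvStrided n i.toNat xs := by
  intro xs
  induction xs with
  | nil => intro i hi; rw [pv_slice?_nil n i hn]; rfl
  | cons x xs ih =>
      intro i hi
      by_cases h0 : i = 0
      · subst h0
        rw [pv_slice?_cons_zero n x xs hn, Option.getD_some, Int.toNat_zero, pvStrided,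
          ih (n - 1) (by omega), show (n - 1).toNat = n.toNat - 1 by omega]
      · rw [pv_slice?_cons_succ n i x xs (by omega) hn, ih (i - 1) (by omega),
          show i.toNat = (i - 1).toNat + 1 by omega, pvStrided]

-- B-side distribution characterisation
theorem pvDistribute_aux (n : Int) (hn : 0 < n) (key : String) :
    ∀ (xs : List String) (s : Int), 0 ≤ s →
      ∀ (res : List (List (String × List String))) (i : Nat), (i : Int) < n →
      ((PySem.List.enumerate xs s).foldl
          (fun res jx => res.modify (PySem.Int.mod jx.1 n).toNat (fun d => pvAppendKey d key jx.2)) res)[i]? =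
        (res[i]?).map (fun d => pvAppendMany d key (pvStrided n (((i : Int) - s) % n).toNat xs)) := by
  intro xs
  induction xs with
  | nil =>
      intro s hs res i hi
      simp [PySem.List.enumerate_nil, pvStrided, pvAppendMany_nil]
  | cons x xs ih =>
      intro s hs res i hi
      rw [PySem.List.enumerate_cons, List.foldl_cons]
      rw [ih (s + 1) (by omega) _ i hi]
      rw [List.getElem?_modify]
      set m : Int := ((i : Int) - s) % n with hmdef
      have hm0 : 0 ≤ m := Int.emod_nonneg _ hn.ne'
      have hm1 : m < n := Int.emod_lt_of_pos _ hn
      set r : Int := PySem.Int.mod s n with hrdef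
      have hre : r = s % n := PySem.Int.mod_eq_emod_of_pos hn
      have hr0 : 0 ≤ r := by rw [hre]; exact Int.emod_nonneg _ hn.ne'
      have hr1 : r < n := by rw [hre]; exact Int.emod_lt_of_pos _ hn
      have hmr : m = ((i : Int) - r) % n := by
        rw [hmdef, hre, Int.sub_emod ((i : Int)) s n, Int.sub_emod ((i : Int)) (s % n) n,
          Int.emod_emod_of_dvd _ (dvd_refl n)]
      have hiff : m = 0 ↔ (r.toNat = i) := by
        constructor
        · intro h
          by_cases hge : r ≤ (i : Int)
          · have : ((i : Int) - r) % n = (i : Int) - r :=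
              Int.emod_eq_of_lt (by omega) (by omega)
            rw [hmr, this] at h; omega
          · have heq : ((i : Int) - r) % n = (i : Int) - r + n := by
              rw [← Int.add_emod_right]
              exact Int.emod_eq_of_lt (by omega) (by omega)
            rw [hmr, heq] at h; omega
        · intro h
          have : ((i : Int) - r) = 0 := by omega
          rw [hmr, this]; simp
      have hstep : ((i : Int) - (s + 1)) % n = (m - 1) % n := by
        rw [show (i : Int) - (s + 1) = ((i : Int) - s) - 1 by ring,
          Int.sub_emod ((i : Int) - s) 1 n, Int.sub_emod m 1 n, hmdef,
          Int.emod_emod_of_dvd _ (dvd_refl n)]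
      cases hres : res[i]? with
      | none => simp
      | some d =>
          simp only [Option.map_eq_map, Option.map_some]
          by_cases hb : r.toNat = i
          · have hm : m = 0 := hiff.mpr hb
            have hnext : ((i : Int) - (s + 1)) % n = n - 1 := by
              rw [hstep, hm, show (0 : Int) - 1 = (n - 1) + n * (-1) by ring,
                Int.add_mul_emod_self_left]
              exact Int.emod_eq_of_lt (by omega) (by omega)
            rw [if_pos hb, hnext, hm]
            rw [show ((0 : Int)).toNat = 0 from rfl, pvStrided,
              show (n - 1).toNat = n.toNat - 1 by omega, pvAppendMany_appendKey]
          · have hm : m ≠ 0 := fun h => hb (hiff.mp h)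
            have hnext : ((i : Int) - (s + 1)) % n = m - 1 := by
              rw [hstep]
              exact Int.emod_eq_of_lt (by omega) (by omega)
            rw [if_neg hb, hnext, show (m - 1).toNat = m.toNat - 1 by omega,
              show m.toNat = (m.toNat - 1) + 1 by omega, pvStrided]
            rw [show (m.toNat - 1 + 1 - 1) = m.toNat - 1 by omega]

theorem pvDistribute_length (n : Int) (key : String) :
    ∀ (xs : List String) (s : Int) (res : List (List (String × List String))),
      ((PySem.List.enumerate xs s).foldl
          (fun res jx => res.modify (PySem.Int.mod jx.1 n).toNat (fun d => pvAppendKey d key jx.2)) res).length =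
        res.length := by
  intro xs
  induction xs with
  | nil => intro s res; simp [PySem.List.enumerate_nil]
  | cons x xs ih =>
      intro s res
      rw [PySem.List.enumerate_cons, List.foldl_cons, ih]
      simp

-- ===== VERDICT (by name: the statement is the Claim_ definition above) =====
theorem dividir_trabalho_py_spec : Claim_equal_dividir_trabalho_py := by
  intro n cat_config _ _
  unfold Spec_dividir_trabalho_py dividir_trabalho_py dividir_trabalho_py_alt
  by_cases hn : 0 < n
  case neg =>
    rw [if_neg hn, PySem.List.pyRange_one_eq_nil (by omega)]
    simp
  case pos =>
    rw [if_pos hn]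
    set F := (cat_config.lookup "freelas").getD [] with hF
    set R := (cat_config.lookup "reddit").getD [] with hR
    set G := (cat_config.lookup "github").getD [] with hG
    simp only [List.foldl_cons, List.foldl_nil]
    refine List.ext_getElem? fun i => ?_
    by_cases hi : (i : Int) < n
    case neg =>
      -- both sides have length n.toNat ≤ i, so both lookups are none
      rw [List.getElem?_eq_none ?h1, List.getElem?_eq_none ?h2]
      case h1 =>
        simp only [List.length_map, PySem.List.length_pyRange_one]
        omega
      case h2 =>
        unfold pvDistribute
        rw [pvDistribute_length, pvDistribute_length, pvDistribute_length]
        simp only [List.length_map, PySem.List.length_pyRange_one]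
        omega
    case pos =>
      have hi0 : ((i : Int)) - 0 = (i : Int) := by ring
      unfold pvDistribute
      rw [pvDistribute_aux n hn _ G 0 (by omega) _ i hi]
      rw [pvDistribute_aux n hn _ R 0 (by omega) _ i hi]
      rw [pvDistribute_aux n hn _ F 0 (by omega) _ i hi]
      have hn' : n = ((n.toNat : Int)) := by omega
      have hinat : i < n.toNat := by omega
      rw [hi0, Int.emod_eq_of_lt (by omega) hi]
      rw [hn', PySem.List.getElem?_map_pyRange_zero _ n.toNat i hinat]
      rw [PySem.List.getElem?_map_pyRange_zero _ n.toNat i hinat]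
      simp only [Option.map_some]
      rw [← hn']
      rw [PySem.List.pyGetD_map_pyRange_of_nonneg _ n _ [] (by omega) hi]
      rw [PySem.List.pyGetD_map_pyRange_of_nonneg _ n _ [] (by omega) hi]
      rw [PySem.List.pyGetD_map_pyRange_of_nonneg _ n _ [] (by omega) hi]
      rw [pv_slice?_eq_pvStrided n hn F _ (by omega)]
      rw [pv_slice?_eq_pvStrided n hn R _ (by omega)]
      rw [pv_slice?_eq_pvStrided n hn G _ (by omega)]
      simp [pvAppendMany]
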